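-- pv_equiv track=rewrite | github.com/MNasilowski/Learning | Python/Codility_tasks/prime.py | semiprime
-- ===== SOURCE A (Python) =====
-- def sieve(n):
--     sieve = [True] * (n + 1)
--     sieve[0] = sieve[1] = False
--     i=2
--     while (i * i <= n):
--         if (sieve[i]):
--             k=i * i
--             while (k <= n):
--                 sieve[k] = False
--                 k += i
--         i += 1
--     return sieve
--
-- def prime(n):
--     prime = []
--     sieve_a = sieve(n)
--     for i in range(len(sieve_a)):
--         if sieve_a[i]:
--             prime.append(i)
--     return prime
--
-- def semiprime(n):
--     semiprime = [0] * (n + 1)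
--     prime_a = prime(n)
--     nr_of_prime = len(prime_a)
--     for i in range(nr_of_prime):
--         for j in range(nr_of_prime):
--             nr = prime_a[i]*prime_a[j]
--             try:
--                 semiprime[nr] = 1
--             except:
--                 break
--     return semiprime
-- ===== SOURCE B (Python) =====
-- def sieve(n):
--     sieve = [True] * (n + 1)
--     sieve[0] = sieve[1] = False
--     i=2
--     while (i * i <= n):
--         if (sieve[i]):
--             k=i * i
--             while (k <= n):
--                 sieve[k] = False
--                 k += i
--         i += 1
--     return sieve
--
--
-- def semiprime(n):
--     # mark p*q for primes p <= sqrt(n) and primes q in [p, n//p]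
--     isp = sieve(n)
--     res = [0] * (n + 1)
--     p = 2
--     while p * p <= n:
--         if isp[p]:
--             for q in range(p, n // p + 1):
--                 if isp[q]:
--                     res[p * q] = 1
--         p += 1
--     return res
-- ===== Notes on version B (the rewrite author's own statement) =====
-- stated objective: simpler
-- what changed: Instead of building the explicit prime list and attempting all ordered pairs of primes with a try/except IndexError as the stopping rule, B keeps the sieve's boolean array and directly marks p*q for primes p with p*p <= n and primes q in [p, n//p], so only in-range products are generated and no exception handling is needed.
import Mathlib
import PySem

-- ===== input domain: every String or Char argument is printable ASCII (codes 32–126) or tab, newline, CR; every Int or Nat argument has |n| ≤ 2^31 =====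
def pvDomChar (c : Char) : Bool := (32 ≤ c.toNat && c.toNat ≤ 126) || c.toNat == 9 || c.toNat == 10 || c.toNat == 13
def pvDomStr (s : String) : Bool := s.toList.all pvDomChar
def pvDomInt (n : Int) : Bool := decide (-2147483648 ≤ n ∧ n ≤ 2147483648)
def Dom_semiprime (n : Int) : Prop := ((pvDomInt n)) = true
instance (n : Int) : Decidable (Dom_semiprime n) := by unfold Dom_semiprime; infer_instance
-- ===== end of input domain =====

-- B replaces A's prime-list pair enumeration (with try/except as stopping rule) by direct
-- marking of p*q over the sieve array for p*p ≤ n and q ∈ [p, n//p]; objective: simpler.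

-- ===== PORT A =====

-- termination helper for the sieve's outer while loop (i*i ≤ n → i ≤ n)
theorem pv_sq_le_self {i n : Int} (h : i * i ≤ n) : i ≤ n := by
  nlinarith [mul_self_nonneg i, mul_self_nonneg (i - 1)]

-- while (i*i <= n): if sieve[i]: for k in i*i, i*i+i, … ≤ n: sieve[k]=False ; i += 1
def sieveLoop (n : Int) (s : List Bool) (i : Int) : List Bool :=
  if h : i * i ≤ n then
    let s' := if PySem.List.pyGetD s i false then
        (PySem.List.pyRange (i * i) (n + 1) i).foldl
          (fun t k => PySem.List.pySetD t k false) s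
      else s
    sieveLoop n s' (i + 1)
  else s
termination_by (n + 1 - i).toNat
decreasing_by
  have := pv_sq_le_self h
  omega

def sieveL (n : Int) : List Bool :=
  let s0 := List.replicate (n + 1).toNat true
  let s1 := PySem.List.pySetD s0 0 false
  let s2 := PySem.List.pySetD s1 1 false
  sieveLoop n s2 2

def primeL (n : Int) : List Int :=
  let sa := sieveL n
  (PySem.List.pyRange 0 (sa.length : Int) 1).foldl
    (fun acc i => if PySem.List.pyGetD sa i false then acc ++ [i] else acc) []

-- inner j-loop of A: try: semiprime[nr] = 1 except: break
def innerA (P : List Int) (pi : Int) (arr : List Int) : List Int → List Int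
  | [] => arr
  | j :: js =>
    let nr := pi * PySem.List.pyGetD P j 0
    match PySem.List.pySet? arr nr (1 : Int) with
    | some arr' => innerA P pi arr' js
    | none => arr

def semiprime (n : Int) : List Int :=
  let arr := List.replicate (n + 1).toNat (0 : Int)
  let P := primeL n
  let m : Int := (P.length : Int)
  (PySem.List.pyRange 0 m 1).foldl
    (fun a i => innerA P (PySem.List.pyGetD P i 0) a (PySem.List.pyRange 0 m 1)) arr

-- ===== PORT B =====

-- while p*p <= n: if isp[p]: for q in range(p, n//p + 1): if isp[q]: res[p*q] = 1 ; p += 1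
def bLoop (n : Int) (isp : List Bool) (res : List Int) (p : Int) : List Int :=
  if h : p * p ≤ n then
    let res' := if PySem.List.pyGetD isp p false then
        (PySem.List.pyRange p (PySem.Int.floordiv n p + 1) 1).foldl
          (fun r q => if PySem.List.pyGetD isp q false then PySem.List.pySetD r (p * q) (1 : Int) else r) res
      else res
    bLoop n isp res' (p + 1)
  else res
termination_by (n + 1 - p).toNat
decreasing_by
  have := pv_sq_le_self h
  omega

def semiprime_alt (n : Int) : List Int :=
  bLoop n (sieveL n) (List.replicate (n + 1).toNat (0 : Int)) 2

-- ===== PRECONDITION & SPEC =====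
-- Pre_ excludes n ≤ 0, where the Python A (and B) raise IndexError in sieve (sieve[1] on a
-- list of length ≤ 1); it admits every n ≥ 1, on all of which A returns normally.
def Pre_semiprime (n : Int) : Prop := 1 ≤ n
instance (n : Int) : Decidable (Pre_semiprime n) := by unfold Pre_semiprime; infer_instance
def pvWitness_semiprime : Int := (10)

def Spec_semiprime (n : Int) (out : List Int) : Prop := out = semiprime_alt n
instance (n : Int) (out : List Int) : Decidable (Spec_semiprime n out) := by unfold Spec_semiprime; infer_instance

-- ===== CLAIM (what is proved, stated in full; the proofs are below) =====
def Claim_equal_semiprime : Prop := ∀ (n : Int), Dom_semiprime n → Pre_semiprime n → Spec_semiprime n (semiprime n)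

-- ===== LEMMAS AND PROOFS =====

-- generic fold lemmas
theorem pv_foldl_pySetD_length {α : Type} (v : α) (ks : List Int) (s : List α) :
    (ks.foldl (fun t k => PySem.List.pySetD t k v) s).length = s.length := by
  induction ks generalizing s with
  | nil => rfl
  | cons k ks ih => rw [List.foldl_cons, ih (PySem.List.pySetD s k v), PySem.List.length_pySetD]

theorem pv_foldl_pySetD_getElem?_ne {α : Type} (v : α) (ks : List Int) (s : List α) (x : Nat)
    (h : ∀ k ∈ ks, 0 ≤ k ∧ k.toNat ≠ x) :
    (ks.foldl (fun t k => PySem.List.pySetD t k v) s)[x]? = s[x]? := by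
  induction ks generalizing s with
  | nil => rfl
  | cons k ks ih =>
    obtain ⟨h0, hne⟩ := h k (by simp)
    rw [List.foldl_cons, ih _ (fun k hk => h k (by simp [hk])),
      PySem.List.pySetD_of_nonneg _ _ h0, List.getElem?_set_ne hne]

theorem pv_foldl_set1_getElem? (ks : List Int) (arr : List Int) (x : Nat)
    (h : ∀ k ∈ ks, 0 ≤ k ∧ k < (arr.length : Int)) :
    (ks.foldl (fun a k => PySem.List.pySetD a k (1:Int)) arr)[x]? =
      if (x : Int) ∈ ks then some 1 else arr[x]? := by
  induction ks generalizing arr with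
  | nil => simp
  | cons k ks ih =>
    obtain ⟨h0, hlt⟩ := h k (by simp)
    rw [List.foldl_cons, PySem.List.pySetD_of_nonneg _ _ h0,
      ih _ (by simpa [List.length_set] using fun k hk => h k (by simp [hk]))]
    by_cases hks : (x : Int) ∈ ks
    · simp [hks]
    · by_cases hkx : k.toNat = x
      · have hx : (x : Int) = k := by omega
        rw [if_neg hks, if_pos (by simp [hx]), hkx, List.getElem?_set_self (by omega)]
      · rw [List.getElem?_set_ne hkx, if_neg hks, if_neg (by
          simp only [List.mem_cons]
          rintro (hc | hc)
          · omega
          · exact hks hc)]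

-- sieve facts
theorem pv_sieveLoop_length (n : Int) (s : List Bool) (i : Int) :
    (sieveLoop n s i).length = s.length := by
  rw [sieveLoop]
  split
  · next h =>
    rw [pv_sieveLoop_length n _ (i + 1)]
    split
    · exact pv_foldl_pySetD_length _ _ _
    · rfl
  · rfl
termination_by (n + 1 - i).toNat
decreasing_by all_goals (rename_i h; have := pv_sq_le_self h; omega)

theorem pv_sieveLoop_low (n : Int) (s : List Bool) (i : Int) (hi : 2 ≤ i) (x : Nat) (hx : x < 4) :
    (sieveLoop n s i)[x]? = s[x]? := by
  rw [sieveLoop]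
  split
  · next h =>
    rw [pv_sieveLoop_low n _ (i + 1) (by omega) x hx]
    split
    · refine pv_foldl_pySetD_getElem?_ne _ _ _ _ (fun k hk => ?_)
      have hmem := (PySem.List.mem_pyRange_iff_of_pos (by omega) k).mp hk
      have h4 : (4 : Int) ≤ i * i := by nlinarith
      constructor <;> omega
    · rfl
  · rfl
termination_by (n + 1 - i).toNat
decreasing_by all_goals (rename_i h; have := pv_sq_le_self h; omega)

theorem pv_sieveL_length (n : Int) : (sieveL n).length = (n + 1).toNat := by
  unfold sieveL
  rw [pv_sieveLoop_length]
  simp [PySem.List.length_pySetD]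

theorem pv_sieveL_zero (n : Int) (hn : 1 ≤ n) : (sieveL n)[0]? = some false := by
  unfold sieveL
  rw [pv_sieveLoop_low n _ 2 le_rfl 0 (by omega),
    PySem.List.pySetD_of_nonneg _ _ (by omega : (0:Int) ≤ 1), PySem.List.pySetD_of_nonneg _ _ (by omega : (0:Int) ≤ 0)]
  simp only [Int.toNat_zero, Int.toNat_one]
  rw [List.getElem?_set_ne (by omega), List.getElem?_set_self (by simp; omega)]

theorem pv_sieveL_one (n : Int) (hn : 1 ≤ n) : (sieveL n)[1]? = some false := by
  unfold sieveL
  rw [pv_sieveLoop_low n _ 2 le_rfl 1 (by omega),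
    PySem.List.pySetD_of_nonneg _ _ (by omega : (0:Int) ≤ 1), PySem.List.pySetD_of_nonneg _ _ (by omega : (0:Int) ≤ 0)]
  simp only [Int.toNat_zero, Int.toNat_one]
  rw [List.getElem?_set_self (by simp [List.length_set]; omega)]

-- primeL facts
theorem pv_primeL_eq (n : Int) :
    primeL n = (PySem.List.pyRange 0 ((sieveL n).length : Int) 1).filter
      (fun i => PySem.List.pyGetD (sieveL n) i false) := by
  unfold primeL
  simpa using PySem.List.foldl_append_if
    (fun i => PySem.List.pyGetD (sieveL n) i false) id (PySem.List.pyRange 0 ((sieveL n).length : Int) 1) []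

theorem pv_mem_primeL {n a : Int} :
    a ∈ primeL n ↔ 0 ≤ a ∧ a < ((sieveL n).length : Int) ∧
      PySem.List.pyGetD (sieveL n) a false = true := by
  rw [pv_primeL_eq]
  simp only [List.mem_filter, PySem.List.mem_pyRange_one]
  tauto

theorem pv_primeL_two_le {n : Int} (hn : 1 ≤ n) {a : Int} (ha : a ∈ primeL n) : 2 ≤ a := by
  obtain ⟨h0, hlt, htrue⟩ := pv_mem_primeL.mp ha
  by_contra hcon
  have hlen : 2 ≤ (sieveL n).length := by
    rw [pv_sieveL_length]; omega
  interval_cases a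
  · rw [PySem.List.pyGetD_eq_getElem _ _ le_rfl (by exact_mod_cast hlt)] at htrue
    have := pv_sieveL_zero n hn
    simp only [Int.toNat_zero] at htrue
    rw [List.getElem?_eq_getElem (by omega)] at this
    simp only [Option.some_inj] at this
    rw [this] at htrue; exact Bool.noConfusion htrue
  · rw [PySem.List.pyGetD_eq_getElem _ _ (by omega) (by exact_mod_cast hlt)] at htrue
    have := pv_sieveL_one n hn
    simp only [Int.toNat_one] at htrue
    rw [List.getElem?_eq_getElem (by omega)] at this
    simp only [Option.some_inj] at this
    rw [this] at htrue; exact Bool.noConfusion htrue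

theorem pv_primeL_sorted (n : Int) : (primeL n).Pairwise (· < ·) := by
  rw [pv_primeL_eq]
  exact (PySem.List.pairwise_lt_pyRange_one _ _).filter _

theorem pv_innerA_eq (n : Int) (hn : 0 ≤ n) (P : List Int) (pi : Int) :
    ∀ (js : List Int) (arr : List Int), arr.length = (n + 1).toNat →
      (∀ j ∈ js, 0 ≤ pi * PySem.List.pyGetD P j 0) →
      js.Pairwise (fun a b => pi * PySem.List.pyGetD P a 0 ≤ pi * PySem.List.pyGetD P b 0) →
      innerA P pi arr js =
        ((js.filter (fun j => decide (pi * PySem.List.pyGetD P j 0 ≤ n))).map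
            (fun j => pi * PySem.List.pyGetD P j 0)).foldl
          (fun a k => PySem.List.pySetD a k (1:Int)) arr := by
  intro js
  induction js with
  | nil => intro arr _ _ _; rfl
  | cons j js ih =>
    intro arr hlen hnn hpw
    have hj0 : 0 ≤ pi * PySem.List.pyGetD P j 0 := hnn j (by simp)
    by_cases hle : pi * PySem.List.pyGetD P j 0 ≤ n
    · have hlt : (pi * PySem.List.pyGetD P j 0).toNat < arr.length := by omega
      have hset : PySem.List.pySet? arr (pi * PySem.List.pyGetD P j 0) (1:Int)
          = some (arr.set (pi * PySem.List.pyGetD P j 0).toNat 1) := by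
        conv_lhs => rw [show pi * PySem.List.pyGetD P j 0
          = (((pi * PySem.List.pyGetD P j 0).toNat : Nat) : Int) from (Int.toNat_of_nonneg hj0).symm]
        rw [PySem.List.pySet?_natCast _ _ _ hlt]
      simp only [innerA, hset]
      rw [ih _ (by simp [hlen]) (fun j' hj' => hnn j' (by simp [hj'])) hpw.of_cons,
        List.filter_cons_of_pos (by simpa using hle), List.map_cons, List.foldl_cons,
        PySem.List.pySetD_of_nonneg _ _ hj0]
    · have hset : PySem.List.pySet? arr (pi * PySem.List.pyGetD P j 0) (1:Int) = none := by
        rw [PySem.List.pySet?_eq_none_iff]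
        intro hir
        unfold PySem.Raise.InRange at hir
        omega
      simp only [innerA, hset]
      rw [List.filter_cons_of_neg (by simpa using hle),
        List.filter_eq_nil_iff.mpr (fun j' hj' => by
          have := (List.pairwise_cons.mp hpw).1 j' hj'
          simp only [decide_eq_true_eq]
          omega)]
      rfl

theorem pv_range_getD_mem (n : Int) :
    ∀ i ∈ PySem.List.pyRange 0 ((primeL n).length : Int) 1,
      PySem.List.pyGetD (primeL n) i 0 ∈ primeL n := by
  intro i hi
  have h := PySem.List.mem_pyRange_one.mp hi
  refine PySem.List.pyGetD_mem _ _ ?_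
  unfold PySem.Raise.InRange
  omega

theorem pv_products_pairwise (n : Int) (pi : Int) (hpi : 0 ≤ pi) :
    (PySem.List.pyRange 0 ((primeL n).length : Int) 1).Pairwise
      (fun a b => pi * PySem.List.pyGetD (primeL n) a 0 ≤ pi * PySem.List.pyGetD (primeL n) b 0) := by
  rw [List.pairwise_iff_getElem]
  intro k k' hk hk' hlt
  have hk2 : k < (primeL n).length := by
    have := PySem.List.length_pyRange_one 0 ((primeL n).length : Int)
    omega
  have hk'2 : k' < (primeL n).length := by
    have := PySem.List.length_pyRange_one 0 ((primeL n).length : Int)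
    omega
  rw [PySem.List.getElem_pyRange_one, PySem.List.getElem_pyRange_one]
  simp only [zero_add, PySem.List.pyGetD_natCast, List.getD_eq_getElem _ _ hk2,
    List.getD_eq_getElem _ _ hk'2]
  have hsort := List.pairwise_iff_getElem.mp (pv_primeL_sorted n) k k' hk2 hk'2 hlt
  exact mul_le_mul_of_nonneg_left (le_of_lt hsort) hpi

def prodList (n : Int) : List Int :=
  (PySem.List.pyRange 0 ((primeL n).length : Int) 1).flatMap (fun i =>
    ((PySem.List.pyRange 0 ((primeL n).length : Int) 1).filter
       (fun j => decide (PySem.List.pyGetD (primeL n) i 0 * PySem.List.pyGetD (primeL n) j 0 ≤ n))).map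
      (fun j => PySem.List.pyGetD (primeL n) i 0 * PySem.List.pyGetD (primeL n) j 0))

theorem pv_outer (n : Int) (hn : 1 ≤ n) :
    ∀ (is : List Int) (arr : List Int), arr.length = (n + 1).toNat →
      (∀ i ∈ is, PySem.List.pyGetD (primeL n) i 0 ∈ primeL n) →
      is.foldl (fun a i => innerA (primeL n) (PySem.List.pyGetD (primeL n) i 0) a
          (PySem.List.pyRange 0 ((primeL n).length : Int) 1)) arr
      = (is.flatMap (fun i =>
          ((PySem.List.pyRange 0 ((primeL n).length : Int) 1).filter
             (fun j => decide (PySem.List.pyGetD (primeL n) i 0 * PySem.List.pyGetD (primeL n) j 0 ≤ n))).map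
            (fun j => PySem.List.pyGetD (primeL n) i 0 * PySem.List.pyGetD (primeL n) j 0))).foldl
          (fun a k => PySem.List.pySetD a k (1:Int)) arr := by
  intro is
  induction is with
  | nil => intro arr _ _; rfl
  | cons i is ih =>
    intro arr hlen hmem
    rw [List.foldl_cons, List.flatMap_cons, List.foldl_append]
    have hpi := hmem i (by simp)
    have h2 := pv_primeL_two_le hn hpi
    rw [pv_innerA_eq n (by omega) _ _ _ arr hlen
      (fun j hj => mul_nonneg (by omega)
        (by have := pv_primeL_two_le hn (pv_range_getD_mem n j hj); omega))
      (pv_products_pairwise n _ (by omega))]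
    exact ih _ (by rw [pv_foldl_pySetD_length]; exact hlen) (fun i' hi' => hmem i' (by simp [hi']))

theorem pv_A_getElem? (n : Int) (hn : 1 ≤ n) (x : Nat) :
    (semiprime n)[x]? =
      if (x : Int) ∈ prodList n then some 1 else (List.replicate (n + 1).toNat (0:Int))[x]? := by
  have e1 : semiprime n = (prodList n).foldl (fun a k => PySem.List.pySetD a k (1:Int))
      (List.replicate (n + 1).toNat (0:Int)) := by
    simp only [semiprime]
    exact pv_outer n hn _ _ (by simp) (pv_range_getD_mem n)
  rw [e1]
  refine pv_foldl_set1_getElem? _ _ _ (fun k hk => ?_)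
  obtain ⟨i, hi, hk2⟩ := List.mem_flatMap.mp hk
  obtain ⟨j, hj, hk3⟩ := List.mem_map.mp hk2
  obtain ⟨hj1, hj2⟩ := List.mem_filter.mp hj
  have hmi := pv_primeL_two_le hn (pv_range_getD_mem n i hi)
  have hmj := pv_primeL_two_le hn (pv_range_getD_mem n j hj1)
  simp only [decide_eq_true_eq] at hj2
  constructor
  · rw [← hk3]; exact mul_nonneg (by omega) (by omega)
  · simp only [List.length_replicate]
    omega

theorem pv_getD_exists {n a : Int} (ha : a ∈ primeL n) :
    ∃ i ∈ PySem.List.pyRange 0 ((primeL n).length : Int) 1,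
      PySem.List.pyGetD (primeL n) i 0 = a := by
  obtain ⟨k, hk, hka⟩ := List.mem_iff_getElem.mp ha
  refine ⟨(k : Int), PySem.List.mem_pyRange_one.mpr ⟨by omega, by exact_mod_cast hk⟩, ?_⟩
  simp only [PySem.List.pyGetD_natCast, List.getD_eq_getElem _ _ hk]
  exact hka

theorem pv_mem_prodList {n : Int} {y : Int} :
    y ∈ prodList n ↔ ∃ a ∈ primeL n, ∃ b ∈ primeL n, a * b = y ∧ y ≤ n := by
  unfold prodList
  constructor
  · intro hy
    obtain ⟨i, hi, hy2⟩ := List.mem_flatMap.mp hy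
    obtain ⟨j, hj, hy3⟩ := List.mem_map.mp hy2
    obtain ⟨hj1, hj2⟩ := List.mem_filter.mp hj
    simp only [decide_eq_true_eq] at hj2
    exact ⟨_, pv_range_getD_mem n i hi, _, pv_range_getD_mem n j hj1, hy3, by omega⟩
  · rintro ⟨a, ha, b, hb, hab, hyn⟩
    obtain ⟨i, hi, hia⟩ := pv_getD_exists ha
    obtain ⟨j, hj, hjb⟩ := pv_getD_exists hb
    refine List.mem_flatMap.mpr ⟨i, hi, List.mem_map.mpr
      ⟨j, List.mem_filter.mpr ⟨hj, ?_⟩, by rw [hia, hjb]; exact hab⟩⟩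
    simp only [hia, hjb, hab, decide_eq_true_eq]
    omega

def ksB (n p : Int) : List Int :=
  ((PySem.List.pyRange p (PySem.Int.floordiv n p + 1) 1).filter
     (fun q => PySem.List.pyGetD (sieveL n) q false)).map (fun q => p * q)

theorem pv_ksB_bounds {n p : Int} (hp : 2 ≤ p) {k : Int} (hk : k ∈ ksB n p) :
    0 ≤ k ∧ k ≤ n := by
  obtain ⟨q, hq, hk2⟩ := List.mem_map.mp hk
  have hq1 := PySem.List.mem_pyRange_one.mp (List.mem_filter.mp hq).1
  have hqn : q * p ≤ n := (PySem.Int.le_floordiv_iff_mul_le (by omega)).mp (by omega)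
  subst hk2
  exact ⟨mul_nonneg (by omega) (by omega), by rw [mul_comm]; exact hqn⟩

def condB (n p : Int) (x : Nat) : Bool :=
  (PySem.List.pyRange p (n + 1) 1).any (fun p' =>
    decide (p' * p' ≤ n) && PySem.List.pyGetD (sieveL n) p' false && decide ((x : Int) ∈ ksB n p'))

theorem pv_condB_iff (n p : Int) (x : Nat) :
    condB n p x = true ↔ ∃ p' ∈ PySem.List.pyRange p (n + 1) 1, p' * p' ≤ n ∧
      PySem.List.pyGetD (sieveL n) p' false = true ∧ (x : Int) ∈ ksB n p' := by
  simp only [condB, List.any_eq_true, Bool.and_eq_true, decide_eq_true_eq]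
  tauto

theorem pv_bLoop_getElem? (n : Int) (hn : 1 ≤ n) (res : List Int) (p : Int) (hp : 2 ≤ p)
    (hres : res.length = (n + 1).toNat) (x : Nat) :
    (bLoop n (sieveL n) res p)[x]? =
      if condB n p x then some 1 else res[x]? := by
  rw [bLoop]
  split
  · next hsq =>
    have hpn : p ≤ n := pv_sq_le_self hsq
    have hcons : PySem.List.pyRange p (n + 1) 1 = p :: PySem.List.pyRange (p + 1) (n + 1) 1 :=
      PySem.List.pyRange_one_cons (by omega)
    have hsplit : condB n p x =
        ((decide (p * p ≤ n) && PySem.List.pyGetD (sieveL n) p false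
            && decide ((x : Int) ∈ ksB n p)) || condB n (p + 1) x) := by
      unfold condB
      rw [hcons, List.any_cons]
    by_cases hisp : PySem.List.pyGetD (sieveL n) p false = true
    · rw [if_pos hisp]
      have hconv : (PySem.List.pyRange p (PySem.Int.floordiv n p + 1) 1).foldl
            (fun r q => if PySem.List.pyGetD (sieveL n) q false
              then PySem.List.pySetD r (p * q) (1:Int) else r) res
          = (ksB n p).foldl (fun a k => PySem.List.pySetD a k (1:Int)) res := by
        unfold ksB
        rw [List.foldl_map, List.foldl_filter]
      rw [hconv, pv_bLoop_getElem? n hn _ (p + 1) (by omega)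
          (by rw [pv_foldl_pySetD_length]; exact hres) x,
        pv_foldl_set1_getElem? (ksB n p) res x (fun k hk => by
          have hb := pv_ksB_bounds hp hk
          exact ⟨hb.1, by omega⟩),
        hsplit]
      by_cases hrest : condB n (p + 1) x = true
      · simp [hrest]
      · by_cases hx : (x : Int) ∈ ksB n p
        · simp [hrest, hx, hsq, hisp]
        · simp [hrest, hx]
    · rw [if_neg hisp]
      rw [pv_bLoop_getElem? n hn _ (p + 1) (by omega) hres x, hsplit]
      simp only [Bool.not_eq_true] at hisp
      simp [hisp]
  · next hsq =>
    rw [if_neg]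
    intro hc
    obtain ⟨p', hp', hc2, -⟩ := (pv_condB_iff n p x).mp hc
    have hpp' := (PySem.List.mem_pyRange_one.mp hp').1
    have : p * p ≤ p' * p' := mul_le_mul hpp' hpp' (by omega) (by omega)
    omega
termination_by (n + 1 - p).toNat
decreasing_by all_goals omega

theorem pv_cond_of (n : Int) (hn : 1 ≤ n) (x : Nat) (a b : Int) (ha : a ∈ primeL n)
    (hb : b ∈ primeL n) (hle : a ≤ b) (hab : a * b = (x : Int)) (hxn : (x : Int) ≤ n) :
    ∃ p' ∈ PySem.List.pyRange 2 (n + 1) 1, p' * p' ≤ n ∧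
      PySem.List.pyGetD (sieveL n) p' false = true ∧ (x : Int) ∈ ksB n p' := by
  have h2a := pv_primeL_two_le hn ha
  have h2b := pv_primeL_two_le hn hb
  obtain ⟨-, -, hta⟩ := pv_mem_primeL.mp ha
  obtain ⟨-, -, htb⟩ := pv_mem_primeL.mp hb
  have haa : a * a ≤ n := by
    have h1 := mul_le_mul_of_nonneg_left hle (show (0:Int) ≤ a by omega)
    rw [hab] at h1
    omega
  refine ⟨a, PySem.List.mem_pyRange_one.mpr ⟨h2a, by have := pv_sq_le_self haa; omega⟩,
    haa, hta, ?_⟩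
  unfold ksB
  refine List.mem_map.mpr ⟨b, List.mem_filter.mpr
    ⟨PySem.List.mem_pyRange_one.mpr ⟨hle, ?_⟩, by simpa using htb⟩, hab⟩
  have := (PySem.Int.le_floordiv_iff_mul_le (a := n) (b := a) (q := b) (by omega)).mpr
    (by rw [mul_comm]; omega)
  omega

theorem pv_cond_iff (n : Int) (hn : 1 ≤ n) (x : Nat) :
    ((x : Int) ∈ prodList n) ↔
      ∃ p' ∈ PySem.List.pyRange 2 (n + 1) 1, p' * p' ≤ n ∧
        PySem.List.pyGetD (sieveL n) p' false = true ∧ (x : Int) ∈ ksB n p' := by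
  have hlen : ((sieveL n).length : Int) = n + 1 := by rw [pv_sieveL_length]; omega
  rw [pv_mem_prodList]
  constructor
  · rintro ⟨a, ha, b, hb, hab, hxn⟩
    rcases le_total a b with h | h
    · exact pv_cond_of n hn x a b ha hb h hab hxn
    · exact pv_cond_of n hn x b a hb ha h (by rw [mul_comm]; exact hab) hxn
  · rintro ⟨p', hp', hsq, hisp, hx⟩
    obtain ⟨hp2, hplt⟩ := PySem.List.mem_pyRange_one.mp hp'
    obtain ⟨q, hq, hpq⟩ := List.mem_map.mp hx
    obtain ⟨hq1, hq2⟩ := List.mem_filter.mp hq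
    obtain ⟨hpq1, hqlt⟩ := PySem.List.mem_pyRange_one.mp hq1
    have hqn : q * p' ≤ n := (PySem.Int.le_floordiv_iff_mul_le (by omega)).mp (by omega)
    have hq_le : q ≤ q * p' := le_mul_of_one_le_right (by omega) (by omega)
    have hpqn : p' * q ≤ n := by rw [mul_comm]; exact hqn
    refine ⟨p', pv_mem_primeL.mpr ⟨by omega, by omega, hisp⟩,
      q, pv_mem_primeL.mpr ⟨by omega, by omega, by simpa using hq2⟩, hpq, by omega⟩

theorem pv_main (n : Int) (hn : 1 ≤ n) : semiprime n = semiprime_alt n := by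
  apply List.ext_getElem?
  intro x
  rw [pv_A_getElem? n hn x]
  unfold semiprime_alt
  rw [pv_bLoop_getElem? n hn _ 2 (by omega) (by simp) x]
  exact if_congr ((pv_cond_iff n hn x).trans (pv_condB_iff n 2 x).symm) rfl rfl

-- ===== VERDICT (by name: the statement is the Claim_ definition above) =====
theorem semiprime_spec : Claim_equal_semiprime := by
  intro n _ hpre
  unfold Spec_semiprime
  exact pv_main n hpre
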